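-- pv_equiv track=rewrite | github.com/jsteiak/actions | actions/update_teams.py | get_progress_label
-- ===== SOURCE A (Python) =====
-- PROGRESS_LABELS = {
--     '0 - Backlog': 0,
--     '1 - Ready': 1,
--     '2 - Working': 2,
--     '3 - Complete': 3,
-- }
--
-- def get_progress_label(labels):
--     max_progress = -1
--     progress_label = None
--     for label in labels:
--         name = label['name']
--         progress = PROGRESS_LABELS.get(name, -1)
--         if progress > max_progress:
--             max_progress = progress
--             progress_label = name
--
--     return progress_label
-- ===== SOURCE B (Python) =====
-- PROGRESS_LABELS = {
--     '0 - Backlog': 0,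
--     '1 - Ready': 1,
--     '2 - Working': 2,
--     '3 - Complete': 3,
-- }
--
-- def get_progress_label(labels):
--     names = {label['name'] for label in labels}
--     for name in ('3 - Complete', '2 - Working', '1 - Ready', '0 - Backlog'):
--         if name in names:
--             return name
--     return None
-- ===== Notes on version B (the rewrite author's own statement) =====
-- stated objective: alternative
-- what changed: Instead of tracking a running maximum progress over the labels, B collects the present names into a set once and walks the fixed priority table ('3 - Complete' down to '0 - Backlog'), returning the first name present.
import Mathlib
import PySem

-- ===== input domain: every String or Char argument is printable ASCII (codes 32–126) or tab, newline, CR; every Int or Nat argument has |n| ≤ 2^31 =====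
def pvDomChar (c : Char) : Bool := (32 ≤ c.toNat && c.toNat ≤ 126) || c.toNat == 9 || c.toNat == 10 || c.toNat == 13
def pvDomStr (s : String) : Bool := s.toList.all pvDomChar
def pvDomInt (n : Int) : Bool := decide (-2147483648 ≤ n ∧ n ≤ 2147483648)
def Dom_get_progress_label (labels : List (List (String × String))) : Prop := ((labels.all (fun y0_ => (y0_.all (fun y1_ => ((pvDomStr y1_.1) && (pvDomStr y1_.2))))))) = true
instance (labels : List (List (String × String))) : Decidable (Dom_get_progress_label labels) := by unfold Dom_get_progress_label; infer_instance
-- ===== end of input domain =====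

-- B changes the decomposition (set of names, then a walk of the fixed priority table, instead of a
-- running maximum over the labels); equivalence is about the return value only.

-- ===== PORT A =====
def PROGRESS_LABELS : PySem.Dict String Int :=
  ⟨[("0 - Backlog", 0), ("1 - Ready", 1), ("2 - Working", 2), ("3 - Complete", 3)]⟩

-- label['name'] (first-match lookup; total form, Pre_ keeps the key present)
def pvName (label : List (String × String)) : String :=
  (PySem.Dict.get? ⟨label⟩ "name").getD ""

def get_progress_label (labels : List (List (String × String))) : Option String :=
  (labels.foldl
    (fun (st : Int × Option String) label =>
      let name := pvName label
      let progress := PySem.Dict.getD PROGRESS_LABELS name (-1)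
      if progress > st.1 then (progress, some name) else st)
    (-1, none)).2

-- ===== PORT B =====
def get_progress_label_alt (labels : List (List (String × String))) : Option String :=
  let names : PySem.Set String := PySem.Set.ofList (labels.map pvName)
  List.find? (fun n => PySem.Set.contains names n)
    ["3 - Complete", "2 - Working", "1 - Ready", "0 - Backlog"]

-- ===== PRECONDITION & SPEC =====
-- Pre_ excludes labels missing the 'name' key, on which the Python A raises KeyError.
def Pre_get_progress_label (labels : List (List (String × String))) : Prop :=
  ∀ l ∈ labels, "name" ∈ l.map Prod.fst
instance (labels : List (List (String × String))) : Decidable (Pre_get_progress_label labels) := by unfold Pre_get_progress_label; infer_instance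
def pvWitness_get_progress_label : (List (List (String × String))) :=
  ([[("name", "2 - Working")], [("name", "stale")], [("name", "3 - Complete"), ("color", "red")]])

def Spec_get_progress_label (labels : List (List (String × String))) (out : Option String) : Prop := out = get_progress_label_alt labels
instance (labels : List (List (String × String))) (out : Option String) : Decidable (Spec_get_progress_label labels out) := by unfold Spec_get_progress_label; infer_instance

-- ===== CLAIM (what is proved, stated in full; the proofs are below) =====
def Claim_equal_get_progress_label : Prop := ∀ (labels : List (List (String × String))), Dom_get_progress_label labels → Pre_get_progress_label labels → Spec_get_progress_label labels (get_progress_label labels)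

-- ===== LEMMAS AND PROOFS =====

-- PROGRESS_LABELS.get(name, -1), characterised
def progOf (n : String) : Int := PySem.Dict.getD PROGRESS_LABELS n (-1)

lemma gd_eq (n : String) : PySem.Dict.getD PROGRESS_LABELS n (-1) = progOf n := rfl

lemma progOf_default (n : String) (h3 : n ≠ "3 - Complete") (h2 : n ≠ "2 - Working")
    (h1 : n ≠ "1 - Ready") (h0 : n ≠ "0 - Backlog") : progOf n = -1 := by
  simp [progOf, PROGRESS_LABELS, PySem.Dict.getD, PySem.Dict.get?,
    Ne.symm h3, Ne.symm h2, Ne.symm h1, Ne.symm h0]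

lemma progOf_cases (n : String) :
    progOf n = (if n = "3 - Complete" then 3 else if n = "2 - Working" then 2
      else if n = "1 - Ready" then 1 else if n = "0 - Backlog" then 0 else -1) := by
  by_cases h3 : n = "3 - Complete"
  · subst h3; decide
  by_cases h2 : n = "2 - Working"
  · subst h2; decide
  by_cases h1 : n = "1 - Ready"
  · subst h1; decide
  by_cases h0 : n = "0 - Backlog"
  · subst h0; decide
  rw [progOf_default n h3 h2 h1 h0]
  simp [h3, h2, h1, h0]

lemma progOf_le2 (n : String) (h3 : n ≠ "3 - Complete") : progOf n ≤ 2 := by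
  rw [progOf_cases]; split_ifs <;> first | omega | simp_all

lemma progOf_le1 (n : String) (h3 : n ≠ "3 - Complete") (h2 : n ≠ "2 - Working") :
    progOf n ≤ 1 := by
  rw [progOf_cases]; split_ifs <;> first | omega | simp_all

lemma progOf_le0 (n : String) (h3 : n ≠ "3 - Complete") (h2 : n ≠ "2 - Working")
    (h1 : n ≠ "1 - Ready") : progOf n ≤ 0 := by
  rw [progOf_cases]; split_ifs <;> first | omega | simp_all

lemma progOf_lem1 (n : String) (h3 : n ≠ "3 - Complete") (h2 : n ≠ "2 - Working")
    (h1 : n ≠ "1 - Ready") (h0 : n ≠ "0 - Backlog") : progOf n ≤ -1 := by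
  rw [progOf_cases]; split_ifs <;> first | omega | simp_all

def stepA (st : Int × Option String) (label : List (String × String)) : Int × Option String :=
  let name := pvName label
  let progress := PySem.Dict.getD PROGRESS_LABELS name (-1)
  if progress > st.1 then (progress, some name) else st

lemma fold3 (xs : List (List (String × String))) (pl : Option String) :
    xs.foldl stepA (3, pl) = (3, pl) := by
  induction xs with
  | nil => rfl
  | cons x xs ih =>
    rw [List.foldl_cons]
    have hle : progOf (pvName x) ≤ 3 := by rw [progOf_cases]; split_ifs <;> omega
    have hstep : stepA (3, pl) x = (3, pl) := by
      simp only [stepA, gd_eq]; rw [if_neg (by omega)]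
    rw [hstep, ih]

lemma fold2 (xs : List (List (String × String))) (pl : Option String) :
    xs.foldl stepA (2, pl) =
      (if "3 - Complete" ∈ xs.map pvName then ((3 : Int), some "3 - Complete") else (2, pl)) := by
  induction xs generalizing pl with
  | nil => rfl
  | cons x xs ih =>
    rw [List.foldl_cons]
    by_cases hx3 : pvName x = "3 - Complete"
    · have hstep : stepA (2, pl) x = (3, some "3 - Complete") := by
        simp [stepA, PROGRESS_LABELS, PySem.Dict.getD, PySem.Dict.get?_mk_cons, hx3]
      rw [hstep, fold3]
      simp [hx3]
    · have hle := progOf_le2 _ hx3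
      have hstep : stepA (2, pl) x = (2, pl) := by
        simp only [stepA, gd_eq]; rw [if_neg (by omega)]
      rw [hstep, ih]
      simp [Ne.symm hx3]

lemma fold1 (xs : List (List (String × String))) (pl : Option String) :
    xs.foldl stepA (1, pl) =
      (if "3 - Complete" ∈ xs.map pvName then ((3 : Int), some "3 - Complete")
       else if "2 - Working" ∈ xs.map pvName then ((2 : Int), some "2 - Working")
       else (1, pl)) := by
  induction xs generalizing pl with
  | nil => rfl
  | cons x xs ih =>
    rw [List.foldl_cons]
    by_cases hx3 : pvName x = "3 - Complete"
    · have hstep : stepA (1, pl) x = (3, some "3 - Complete") := by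
        simp [stepA, PROGRESS_LABELS, PySem.Dict.getD, PySem.Dict.get?_mk_cons, hx3]
      rw [hstep, fold3]
      simp [hx3]
    · by_cases hx2 : pvName x = "2 - Working"
      · have hstep : stepA (1, pl) x = (2, some "2 - Working") := by
          simp [stepA, PROGRESS_LABELS, PySem.Dict.getD, PySem.Dict.get?_mk_cons, hx2]
        rw [hstep, fold2]
        simp [hx2]
      · have hle := progOf_le1 _ hx3 hx2
        have hstep : stepA (1, pl) x = (1, pl) := by
          simp only [stepA, gd_eq]; rw [if_neg (by omega)]
        rw [hstep, ih]
        simp [Ne.symm hx3, Ne.symm hx2]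

lemma fold0 (xs : List (List (String × String))) (pl : Option String) :
    xs.foldl stepA (0, pl) =
      (if "3 - Complete" ∈ xs.map pvName then ((3 : Int), some "3 - Complete")
       else if "2 - Working" ∈ xs.map pvName then ((2 : Int), some "2 - Working")
       else if "1 - Ready" ∈ xs.map pvName then ((1 : Int), some "1 - Ready")
       else (0, pl)) := by
  induction xs generalizing pl with
  | nil => rfl
  | cons x xs ih =>
    rw [List.foldl_cons]
    by_cases hx3 : pvName x = "3 - Complete"
    · have hstep : stepA (0, pl) x = (3, some "3 - Complete") := by
        simp [stepA, PROGRESS_LABELS, PySem.Dict.getD, PySem.Dict.get?_mk_cons, hx3]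
      rw [hstep, fold3]
      simp [hx3]
    · by_cases hx2 : pvName x = "2 - Working"
      · have hstep : stepA (0, pl) x = (2, some "2 - Working") := by
          simp [stepA, PROGRESS_LABELS, PySem.Dict.getD, PySem.Dict.get?_mk_cons, hx2]
        rw [hstep, fold2]
        simp [hx2]
      · by_cases hx1 : pvName x = "1 - Ready"
        · have hstep : stepA (0, pl) x = (1, some "1 - Ready") := by
            simp [stepA, PROGRESS_LABELS, PySem.Dict.getD, PySem.Dict.get?_mk_cons, hx1]
          rw [hstep, fold1]
          simp [hx1]
        · have hle := progOf_le0 _ hx3 hx2 hx1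
          have hstep : stepA (0, pl) x = (0, pl) := by
            simp only [stepA, gd_eq]; rw [if_neg (by omega)]
          rw [hstep, ih]
          simp [Ne.symm hx3, Ne.symm hx2, Ne.symm hx1]

lemma foldm1 (xs : List (List (String × String))) :
    xs.foldl stepA (-1, none) =
      (if "3 - Complete" ∈ xs.map pvName then ((3 : Int), some "3 - Complete")
       else if "2 - Working" ∈ xs.map pvName then ((2 : Int), some "2 - Working")
       else if "1 - Ready" ∈ xs.map pvName then ((1 : Int), some "1 - Ready")
       else if "0 - Backlog" ∈ xs.map pvName then ((0 : Int), some "0 - Backlog")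
       else (-1, none)) := by
  induction xs with
  | nil => rfl
  | cons x xs ih =>
    rw [List.foldl_cons]
    by_cases hx3 : pvName x = "3 - Complete"
    · have hstep : stepA (-1, none) x = (3, some "3 - Complete") := by
        simp [stepA, PROGRESS_LABELS, PySem.Dict.getD, PySem.Dict.get?_mk_cons, hx3]
      rw [hstep, fold3]
      simp [hx3]
    · by_cases hx2 : pvName x = "2 - Working"
      · have hstep : stepA (-1, none) x = (2, some "2 - Working") := by
          simp [stepA, PROGRESS_LABELS, PySem.Dict.getD, PySem.Dict.get?_mk_cons, hx2]
        rw [hstep, fold2]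
        simp [hx2]
      · by_cases hx1 : pvName x = "1 - Ready"
        · have hstep : stepA (-1, none) x = (1, some "1 - Ready") := by
            simp [stepA, PROGRESS_LABELS, PySem.Dict.getD, PySem.Dict.get?_mk_cons, hx1]
          rw [hstep, fold1]
          simp [hx1]
        · by_cases hx0 : pvName x = "0 - Backlog"
          · have hstep : stepA (-1, none) x = (0, some "0 - Backlog") := by
              simp [stepA, PROGRESS_LABELS, PySem.Dict.getD, PySem.Dict.get?_mk_cons, hx0]
            rw [hstep, fold0]
            simp [hx0]
          · have hle := progOf_lem1 _ hx3 hx2 hx1 hx0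
            have hstep : stepA (-1, none) x = (-1, none) := by
              simp only [stepA, gd_eq]; rw [if_neg (by omega)]
            rw [hstep, ih]
            simp [Ne.symm hx3, Ne.symm hx2, Ne.symm hx1, Ne.symm hx0]

-- ===== VERDICT (by name: the statement is the Claim_ definition above) =====
theorem get_progress_label_spec : Claim_equal_get_progress_label := by
  intro labels _ _
  unfold Spec_get_progress_label get_progress_label get_progress_label_alt
  rw [show (fun (st : Int × Option String) label =>
      let name := pvName label
      let progress := PySem.Dict.getD PROGRESS_LABELS name (-1)
      if progress > st.1 then (progress, some name) else st) = stepA from rfl]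
  rw [foldm1]
  have hc : ∀ n : String,
      PySem.Set.contains (PySem.Set.ofList (labels.map pvName)) n
        = decide (n ∈ labels.map pvName) := by
    intro n
    cases hb : decide (n ∈ labels.map pvName) <;>
      simp_all [PySem.Set.mem_ofList]
  simp only [List.find?, hc]
  by_cases h3 : "3 - Complete" ∈ labels.map pvName <;>
    by_cases h2 : "2 - Working" ∈ labels.map pvName <;>
    by_cases h1 : "1 - Ready" ∈ labels.map pvName <;>
    by_cases h0 : "0 - Backlog" ∈ labels.map pvName <;>
    simp [h3, h2, h1, h0]
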